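-- pv_equiv track=rewrite | github.com/timkene/REPORT-DASHBOARD | pages/invoice_generator.py | _get_installment_months
-- ===== SOURCE A (Python) =====
-- def _get_installment_months(months, pattern):
--     """
--     Split months into installments based on pattern.
--
--     Args:
--         months (list): List of month names
--         pattern (str): Payment pattern ('monthly', 'quarterly', 'triannually', 'biannually', 'annually')
--
--     Returns:
--         dict: Dictionary with installment numbers as keys and lists of months as values
--     """
--     pattern_months = {
--         'monthly': 1,
--         'quarterly': 3,
--         'triannually': 4,
--         'biannually': 6,
--         'annually': 12
--     }
--
--     months_per_installment = pattern_months.get(pattern.lower(), 1)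
--     installments = {}
--
--     for i in range(0, len(months), months_per_installment):
--         installment_num = (i // months_per_installment) + 1
--         installments[installment_num] = months[i:i + months_per_installment]
--
--     return installments
-- ===== SOURCE B (Python) =====
-- def _get_installment_months(months, pattern):
--     p = pattern.lower()
--     if p == 'monthly':
--         k = 1
--     elif p == 'quarterly':
--         k = 3
--     elif p == 'triannually':
--         k = 4
--     elif p == 'biannually':
--         k = 6
--     elif p == 'annually':
--         k = 12
--     else:
--         k = 1
--     installments = {}
--     num = 0
--     count = k
--     for month in months:
--         if count == k:
--             num += 1
--             installments[num] = []
--             count = 0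
--         installments[num].append(month)
--         count += 1
--     return installments
-- ===== Notes on version B (the rewrite author's own statement) =====
-- stated objective: alternative
-- what changed: Replaces the pattern dict plus the stride-indexed range loop that slices months[i:i+k] by an if/elif lookup and a single per-month pass with a fill counter: when the current bucket holds k months a fresh empty bucket is opened, and each month is appended to the current bucket (no slicing, no division).
import Mathlib
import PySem

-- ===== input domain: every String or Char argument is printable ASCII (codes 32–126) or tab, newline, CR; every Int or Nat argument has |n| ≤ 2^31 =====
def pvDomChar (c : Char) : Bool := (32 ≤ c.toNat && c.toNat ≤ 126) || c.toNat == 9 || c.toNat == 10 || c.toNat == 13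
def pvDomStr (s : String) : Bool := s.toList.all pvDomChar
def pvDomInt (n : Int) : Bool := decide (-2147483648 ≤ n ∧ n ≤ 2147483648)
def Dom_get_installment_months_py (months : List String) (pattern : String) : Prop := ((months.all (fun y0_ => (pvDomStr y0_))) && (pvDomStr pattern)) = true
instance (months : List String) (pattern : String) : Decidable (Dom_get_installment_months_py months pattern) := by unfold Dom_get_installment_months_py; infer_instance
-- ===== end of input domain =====

-- B replaces A's pattern-dict + stride-indexed slicing loop by an if/elif lookup and a
-- single per-month pass with a fill counter that opens a fresh bucket every k months;
-- same result, alternative decomposition.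


-- ===== PORT A =====
def get_installment_months_py (months : List String) (pattern : String) : List (Int × List String) :=
  let pattern_months : PySem.Dict String Int :=
    PySem.Dict.ofList [("monthly", 1), ("quarterly", 3), ("triannually", 4), ("biannually", 6), ("annually", 12)]
  let months_per_installment : Int := pattern_months.getD (PySem.Str.lower pattern) 1
  let installments : PySem.Dict Int (List String) :=
    (PySem.List.pyRange 0 (months.length : Int) months_per_installment).foldl
      (fun d i =>
        d.insert (PySem.Int.floordiv i months_per_installment + 1)
          (PySem.List.slice months (some i) (some (i + months_per_installment))))
      PySem.Dict.empty
  installments.items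

-- ===== PORT B =====
-- Python B's if/elif chain selecting months-per-installment (every branch yields >= 1, so Nat)
def pvLookupK (p : String) : Nat :=
  if p = "monthly" then 1
  else if p = "quarterly" then 3
  else if p = "triannually" then 4
  else if p = "biannually" then 6
  else if p = "annually" then 12
  else 1

-- Python B's loop body over state (installments, num, count):
-- if count == k: num += 1; installments[num] = []; count = 0
-- installments[num].append(month); count += 1
def pvStep (k : Nat) (st : PySem.Dict Int (List String) × Int × Int) (month : String) :
    PySem.Dict Int (List String) × Int × Int :=
  let st2 := if st.2.2 == (k : Int) then (st.1.insert (st.2.1 + 1) ([] : List String), st.2.1 + 1, (0 : Int)) else st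
  (st2.1.modify st2.2.1 [] (· ++ [month]), st2.2.1, st2.2.2 + 1)

def get_installment_months_py_alt (months : List String) (pattern : String) : List (Int × List String) :=
  let k : Nat := pvLookupK (PySem.Str.lower pattern)
  (months.foldl (pvStep k) (PySem.Dict.empty, 0, (k : Int))).1.items

-- ===== PRECONDITION & SPEC =====
def Spec_get_installment_months_py (months : List String) (pattern : String) (out : List (Int × List String)) : Prop := out = get_installment_months_py_alt months pattern
instance (months : List String) (pattern : String) (out : List (Int × List String)) : Decidable (Spec_get_installment_months_py months pattern out) := by unfold Spec_get_installment_months_py; infer_instance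

-- ===== CLAIM (what is proved, stated in full; the proofs are below) =====
def Claim_equal_get_installment_months_py : Prop := ∀ (months : List String) (pattern : String), Dom_get_installment_months_py months pattern → Spec_get_installment_months_py months pattern (get_installment_months_py months pattern)

-- ===== LEMMAS AND PROOFS =====

lemma pvKey_eq (s : String) :
    (PySem.Dict.ofList [("monthly", (1:Int)), ("quarterly", 3), ("triannually", 4), ("biannually", 6), ("annually", 12)]).getD s 1
      = (pvLookupK s : Int) := by
  by_cases h1 : s = "monthly"
  · subst h1; decide
  by_cases h2 : s = "quarterly"
  · subst h2; decide
  by_cases h3 : s = "triannually"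
  · subst h3; decide
  by_cases h4 : s = "biannually"
  · subst h4; decide
  by_cases h5 : s = "annually"
  · subst h5; decide
  have c1 : ("monthly" == s) = false := beq_eq_false_iff_ne.mpr (fun h => h1 h.symm)
  have c2 : ("quarterly" == s) = false := beq_eq_false_iff_ne.mpr (fun h => h2 h.symm)
  have c3 : ("triannually" == s) = false := beq_eq_false_iff_ne.mpr (fun h => h3 h.symm)
  have c4 : ("biannually" == s) = false := beq_eq_false_iff_ne.mpr (fun h => h4 h.symm)
  have c5 : ("annually" == s) = false := beq_eq_false_iff_ne.mpr (fun h => h5 h.symm)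
  have hL : (PySem.Dict.ofList [("monthly", (1:Int)), ("quarterly", 3), ("triannually", 4), ("biannually", 6), ("annually", 12)]).get? s =
      (PySem.Dict.mk [("monthly", (1:Int)), ("quarterly", 3), ("triannually", 4), ("biannually", 6), ("annually", 12)]).get? s := rfl
  rw [PySem.Dict.getD_eq_get?_getD, hL]
  simp only [PySem.Dict.get?_mk_cons, c1, c2, c3, c4, c5]
  simp [pvLookupK, h1, h2, h3, h4, h5, PySem.Dict.get?]

lemma pvLookupK_pos (s : String) : 1 ≤ pvLookupK s := by
  unfold pvLookupK; split_ifs <;> omega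

-- the common reference value: the chunk table, indexed form (matches A's loop)
def pvChunks (kn : Nat) (xs : List String) : List (Int × List String) :=
  (List.range ((xs.length + kn - 1) / kn)).map
    (fun (j : Nat) => ((j : Int) + 1, (xs.drop (kn * j)).take kn))

lemma pvA_chunks (months : List String) (kn : Nat) (hk : 0 < kn) :
    ((PySem.List.pyRange 0 (months.length : Int) (kn : Int)).foldl
      (fun d i =>
        d.insert (PySem.Int.floordiv i (kn : Int) + 1)
          (PySem.List.slice months (some i) (some (i + (kn : Int)))))
      PySem.Dict.empty).items = pvChunks kn months := by
  have hkz : (0:Int) < (kn:Int) := by exact_mod_cast hk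
  set n := months.length with hn
  have hM : PySem.List.pyRange 0 (n : Int) (kn : Int)
      = (List.range ((n + kn - 1) / kn)).map (fun (j:Nat) => ((kn * j : Nat) : Int)) := by
    rw [PySem.List.pyRange_of_pos _ _ hkz]
    by_cases h0 : 0 < n
    · have hif : (0:Int) < (n:Int) := by exact_mod_cast h0
      rw [if_pos hif]
      have h1 : ((n:Int) - 0 + (kn:Int) - 1) = ((n + kn - 1 : Nat) : Int) := by omega
      rw [h1]
      have h2 : (((n + kn - 1 : Nat) : Int) / (kn : Int)) = (((n + kn - 1) / kn : Nat) : Int) := by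
        exact Int.ofNat_ediv_ofNat
      rw [h2, Int.toNat_natCast]
      apply List.map_congr_left
      intro j _
      push_cast; ring
    · have hn0 : n = 0 := by omega
      rw [hn0]
      simp [Nat.div_eq_of_lt (by omega : kn - 1 < kn)]
  rw [hM, List.foldl_map]
  have hkey : ∀ j : Nat, PySem.Int.floordiv ((kn * j : Nat) : Int) (kn : Int) + 1 = (j : Int) + 1 := by
    intro j
    rw [PySem.Int.floordiv_natCast]
    rw [Nat.mul_div_cancel_left j hk]
  have := PySem.Dict.items_foldl_insert_fresh (List.range ((n + kn - 1) / kn))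
      (fun (j:Nat) => PySem.Int.floordiv ((kn * j : Nat) : Int) (kn : Int) + 1)
      (fun (j:Nat) => PySem.List.slice months (some ((kn * j : Nat) : Int)) (some (((kn * j : Nat) : Int) + (kn : Int))))
      PySem.Dict.empty
      (by intro a _; simp)
      (by
        have : (List.map (fun (j:Nat) => PySem.Int.floordiv ((kn * j : Nat) : Int) (kn : Int) + 1) (List.range ((n + kn - 1) / kn)))
            = (List.range ((n + kn - 1) / kn)).map (fun (j:Nat) => (j : Int) + 1) := by
          apply List.map_congr_left; intro j _; exact hkey j
        rw [this]
        exact (List.nodup_range).map (by intro a b hab; simpa using hab))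
  rw [this]
  simp only [PySem.Dict.empty, List.nil_append]
  apply List.map_congr_left
  intro j _
  rw [hkey j, PySem.List.slice_natCast_add months (kn * j) kn]

-- the chunk table, recursive form (matches B's loop)
def pvChunksFrom (kn : Nat) (num : Int) (rest : List String) : List (Int × List String) :=
  match rest with
  | [] => []
  | x :: xs => (num, x :: xs.take (kn - 1)) :: pvChunksFrom kn (num + 1) (xs.drop (kn - 1))
termination_by rest.length
decreasing_by simp

-- B's dict-building loop appends the recursive chunk table to acc's items

-- invariant of B's fold: after xs, the dict is the chunk table, num = ceil(|xs|/k), count = |xs| - k*(num-1)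
lemma pvB_state (kn : Nat) (hk : 1 ≤ kn) (xs : List String) :
    xs.foldl (pvStep kn) (PySem.Dict.empty, 0, (kn : Int))
      = (PySem.Dict.mk (pvChunks kn xs), (((xs.length + kn - 1) / kn : Nat) : Int),
         (xs.length : Int) - (kn : Int) * ((((xs.length + kn - 1) / kn : Nat) : Int) - 1)) := by
  induction xs using List.reverseRecOn with
  | nil =>
      have h0 : (kn - 1) / kn = 0 := Nat.div_eq_of_lt (by omega)
      simp only [List.foldl_nil, pvChunks, List.length_nil, Nat.zero_add, h0,
        List.range_zero, List.map_nil]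
      refine Prod.ext (by rfl) (Prod.ext (by norm_num) ?_)
      simp only
      push_cast
      ring
  | append_singleton xs x ih =>
      set n := xs.length with hn
      set q := n / kn with hq
      set m := (n + kn - 1) / kn with hm
      rw [List.foldl_append, ih, List.foldl_cons, List.foldl_nil]
      -- key list facts about the chunk dict
      have hkeys : (PySem.Dict.mk (pvChunks kn xs)).keys = (List.range m).map (fun (j:Nat) => (j:Int)+1) := by
        simp [PySem.Dict.keys, pvChunks, List.map_map]
        rfl
      have hnodup : (PySem.Dict.mk (pvChunks kn xs)).keys.Nodup := by
        rw [hkeys]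
        exact (List.nodup_range).map (by intro a b hab; simpa using hab)
      have hmemkeys : ∀ c : Int, c ∈ (PySem.Dict.mk (pvChunks kn xs)).keys ↔ ∃ j : Nat, j < m ∧ c = (j:Int)+1 := by
        intro c
        rw [hkeys]
        simp [List.mem_map, List.mem_range, eq_comm]
      rcases Nat.eq_zero_or_pos (n % kn) with hr | hr
      · -- bucket full (count = kn): open a fresh bucket q+1 = m+1 and put x in it
        have h1 : n = kn * q := by rw [hq]; have := Nat.div_add_mod n kn; omega
        have hqm : m = q := by
          rw [hm, hq, h1]
          rcases Nat.eq_zero_or_pos q with h2 | h2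
          · simp [h2, Nat.div_eq_of_lt (by omega : kn - 1 < kn)]
          · have : kn * q + kn - 1 = kn * q + (kn - 1) := by omega
            rw [this, Nat.mul_add_div hk, Nat.div_eq_of_lt (by omega : kn - 1 < kn),
              Nat.mul_div_cancel_left q hk]
            omega
        have h1i : (n : Int) = (kn : Int) * (q : Int) := by exact_mod_cast congrArg (Nat.cast : Nat → Int) h1
        have hcond : (((n : Int) - (kn : Int) * (((m : Nat) : Int) - 1)) == (kn : Int)) = true := by
          rw [beq_iff_eq, hqm, h1i]; ring
        have hmnew : ((xs ++ [x]).length + kn - 1) / kn = q + 1 := by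
          simp only [List.length_append, List.length_cons, List.length_nil, ← hn]
          have e : n + 1 + kn - 1 = kn * q + kn := by omega
          rw [e]
          have e2 : kn * q + kn = kn * (q + 1) := by ring
          rw [e2, Nat.mul_div_cancel_left _ hk]
        have hnc : (PySem.Dict.mk (pvChunks kn xs)).contains ((q:Int)+1) = false := by
          rw [PySem.Dict.contains_eq_decide_mem_keys]
          simp only [decide_eq_false_iff_not, hmemkeys]
          rintro ⟨j, hj, hje⟩
          have : j = q := by omega
          omega
        simp only [pvStep]
        rw [if_pos hcond]
        -- after insert: items = pvChunks kn xs ++ [(q+1, [])]; then modify appends x to that new bucket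
        have hitems1 : ((PySem.Dict.mk (pvChunks kn xs)).insert ((q:Int)+1) ([] : List String)).items
            = pvChunks kn xs ++ [((q:Int)+1, ([] : List String))] :=
          PySem.Dict.items_insert_of_not_contains _ _ hnc
        have hnodup1 : ((PySem.Dict.mk (pvChunks kn xs)).insert ((q:Int)+1) ([] : List String)).keys.Nodup :=
          PySem.Dict.nodup_keys_insert _ _ _ hnodup
        have hmem1 : (((q:Int)+1, ([] : List String))) ∈ ((PySem.Dict.mk (pvChunks kn xs)).insert ((q:Int)+1) ([] : List String)).items := by
          rw [hitems1]; simp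
        have hgetD1 : ((PySem.Dict.mk (pvChunks kn xs)).insert ((q:Int)+1) ([] : List String)).getD ((q:Int)+1) [] = ([] : List String) :=
          PySem.Dict.getD_of_mem_items _ hmem1 hnodup1 _
        have hcont1 : ((PySem.Dict.mk (pvChunks kn xs)).insert ((q:Int)+1) ([] : List String)).contains ((q:Int)+1) = true :=
          PySem.Dict.contains_insert_self _ _ _
        refine Prod.ext ?_ (Prod.ext ?_ ?_) <;> simp only
        · apply PySem.Dict.ext
          rw [hqm, PySem.Dict.modify, hgetD1, PySem.Dict.items_insert_of_contains _ _ hcont1, hitems1]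
          simp only [pvChunks, ← hn, ← hm, hmnew, hqm]
          rw [List.range_succ, List.map_append, List.map_append, List.map_map]
          congr 1
          · apply List.map_congr_left
            intro j hj
            have hj' : j < q := List.mem_range.mp hj
            have hne : (((j:Nat):Int)+1 == ((q:Nat):Int)+1) = false := by
              simp only [beq_eq_false_iff_ne, ne_eq]
              intro h; omega
            simp only [Function.comp_apply, hne, Bool.false_eq_true, if_neg, not_false_iff]
            have e : kn * (j + 1) = kn * j + kn := by ring
            have hle : kn * j + kn ≤ n := by
              have : kn * (j + 1) ≤ kn * q := Nat.mul_le_mul_left kn (by omega)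
              omega
            rw [List.drop_append_of_le_length (by rw [← hn]; omega)]
            rw [List.take_append_of_le_length (by rw [List.length_drop, ← hn]; omega)]
          · have hde : xs.drop (kn * q) = [] := List.drop_eq_nil_of_le (by rw [← hn]; omega)
            have htk : List.take kn ([x] : List String) = [x] :=
              List.take_of_length_le (by simp; omega)
            simp only [List.map_cons, List.map_nil, beq_self_eq_true, if_true]
            rw [List.drop_append_of_le_length (by rw [← hn]; omega), hde]
            simp [htk]
        · rw [hmnew, hqm]; push_cast; ring
        · rw [hmnew]
          simp only [List.length_append, List.length_cons, List.length_nil, ← hn]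
          push_cast
          rw [h1i]
          ring
      · -- bucket not full (count < kn): append x to the current last bucket q+1 = m
        have h1 : n = kn * q + n % kn := by rw [hq]; have := Nat.div_add_mod n kn; omega
        have h2 : n % kn < kn := Nat.mod_lt _ hk
        have hqm : m = q + 1 := by
          rw [hm]
          have e0 : kn * (q + 1) = kn * q + kn := by ring
          have e : n + kn - 1 = kn * (q + 1) + (n % kn - 1) := by omega
          rw [e, Nat.mul_add_div hk, Nat.div_eq_of_lt (by omega : n % kn - 1 < kn)]
        have h1i : (n : Int) = (kn : Int) * (q : Int) + ((n % kn : Nat) : Int) := by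
          exact_mod_cast congrArg (Nat.cast : Nat → Int) h1
        have hri : (1 : Int) ≤ ((n % kn : Nat) : Int) := by exact_mod_cast hr
        have h2i : ((n % kn : Nat) : Int) < (kn : Int) := by exact_mod_cast h2
        have hcount : ((n : Int) - (kn : Int) * (((m : Nat) : Int) - 1)) = ((n % kn : Nat) : Int) := by
          rw [hqm, h1i]; push_cast; ring
        have hcond : (((n : Int) - (kn : Int) * (((m : Nat) : Int) - 1)) == (kn : Int)) = false := by
          rw [beq_eq_false_iff_ne, hcount]
          intro h; omega
        have hcont : (PySem.Dict.mk (pvChunks kn xs)).contains ((q:Int)+1) = true := by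
          rw [PySem.Dict.contains_eq_decide_mem_keys]
          simp only [decide_eq_true_eq, hmemkeys]
          exact ⟨q, by omega, rfl⟩
        have hchunkq : (((q:Int)+1, (xs.drop (kn * q)).take kn)) ∈ (PySem.Dict.mk (pvChunks kn xs)).items := by
          simp only [pvChunks, ← hn, ← hm]
          exact List.mem_map.mpr ⟨q, List.mem_range.mpr (by omega), rfl⟩
        have hgetD : (PySem.Dict.mk (pvChunks kn xs)).getD ((q:Int)+1) [] = (xs.drop (kn * q)).take kn :=
          PySem.Dict.getD_of_mem_items _ hchunkq hnodup _
        have hmnew : ((xs ++ [x]).length + kn - 1) / kn = m := by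
          simp only [List.length_append, List.length_cons, List.length_nil, ← hn]
          rw [hm]
          have e1 : n + 1 + kn - 1 = kn * (q + 1) + (n % kn) := by
            have : kn * (q + 1) = kn * q + kn := by ring
            omega
          have e2 : n + kn - 1 = kn * (q + 1) + (n % kn - 1) := by
            have : kn * (q + 1) = kn * q + kn := by ring
            omega
          rw [e1, e2, Nat.mul_add_div hk, Nat.mul_add_div hk,
            Nat.div_eq_of_lt (by omega : n % kn < kn), Nat.div_eq_of_lt (by omega : n % kn - 1 < kn)]
        simp only [pvStep]
        rw [if_neg (by simp [hcond])]
        refine Prod.ext ?_ (Prod.ext ?_ ?_) <;> simp only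
        · apply PySem.Dict.ext
          rw [hqm, PySem.Dict.modify]
          push_cast
          rw [hgetD, PySem.Dict.items_insert_of_contains _ _ hcont]
          simp only [pvChunks, ← hn, ← hm, hmnew, List.map_map]
          apply List.map_congr_left
          intro j hj
          have hj' : j < m := List.mem_range.mp hj
          by_cases hjq : j = q
          · rw [hjq]
            simp only [Function.comp_apply, beq_self_eq_true, if_pos]
            have hlen : (xs.drop (kn * q)).length = n % kn := by
              rw [List.length_drop, ← hn]; omega
            rw [List.drop_append_of_le_length (by rw [← hn]; omega)]
            rw [List.take_of_length_le (by rw [hlen]; omega : (xs.drop (kn * q)).length ≤ kn)]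
            rw [List.take_of_length_le (by simp [hlen]; omega)]
          · have hne : (((j:Nat):Int)+1 == ((q:Nat):Int)+1) = false := by
              simp only [beq_eq_false_iff_ne, ne_eq]
              intro h; apply hjq; omega
            simp only [Function.comp_apply, hne, Bool.false_eq_true, if_neg, not_false_iff]
            have hj'' : j < q := by omega
            have e : kn * (j + 1) = kn * j + kn := by ring
            have hle : kn * j + kn ≤ n := by
              have : kn * (j + 1) ≤ kn * q := Nat.mul_le_mul_left kn (by omega)
              omega
            rw [List.drop_append_of_le_length (by rw [← hn]; omega)]
            rw [List.take_append_of_le_length (by rw [List.length_drop, ← hn]; omega)]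
        · rw [hmnew]
        · rw [hmnew]
          simp only [List.length_append, List.length_cons, List.length_nil, ← hn]
          push_cast
          ring

-- ===== VERDICT (by name: the statement is the Claim_ definition above) =====
theorem get_installment_months_py_spec : Claim_equal_get_installment_months_py := by
  intro months pattern _
  unfold Spec_get_installment_months_py get_installment_months_py get_installment_months_py_alt
  set kn := pvLookupK (PySem.Str.lower pattern) with hkn
  have hk : 1 ≤ kn := pvLookupK_pos _
  simp only [pvKey_eq, ← hkn]
  rw [pvA_chunks months kn (by omega), pvB_state kn hk months]
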